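-- pv_equiv track=rewrite | github.com/RobertDurfee/Notes | 18-19F/6.006/Problem Set/2/ps2p2.py | shadow_art_divide
-- ===== SOURCE A (Python) =====
-- def shadow_art_divide(A):
--
--     sorted_lower = sorted(map(lambda p: p[0], A))
--     sorted_upper = sorted(map(lambda p: p[1], A))
--
--     number_of_panels = 1
--     lower_index = 1
--     upper_index = 0
--     last_value = sorted_lower[0]
--
--     output = []
--
--     while lower_index < len(sorted_lower) and upper_index < len(sorted_upper):
--
--         if sorted_lower[lower_index] < sorted_upper[upper_index]:
--             if last_value != sorted_lower[lower_index]: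
--                 output.append(((last_value, sorted_lower[lower_index]), number_of_panels))
--             number_of_panels += 1
--             last_value = sorted_lower[lower_index]
--             lower_index += 1
--
--         elif sorted_lower[lower_index] > sorted_upper[upper_index]:
--             if last_value != sorted_upper[upper_index]:
--                 output.append(((last_value, sorted_upper[upper_index]), number_of_panels))
--             number_of_panels -= 1
--             last_value = sorted_upper[upper_index]
--             upper_index += 1
--
--         else:
--             upper_index += 1
--             lower_index += 1
--
--     while lower_index < len(sorted_lower):
--         if last_value != sorted_lower[lower_index]:
--             output.append(((last_value, sorted_lower[lower_index]), number_of_panels))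
--         number_of_panels += 1
--         last_value = sorted_lower[lower_index]
--         lower_index += 1
--
--     while upper_index < len(sorted_upper):
--         if last_value != sorted_upper[upper_index]:
--             output.append(((last_value, sorted_upper[upper_index]), number_of_panels))
--         number_of_panels -= 1
--         last_value = sorted_upper[upper_index]
--         upper_index += 1
--
--     return output
-- ===== SOURCE B (Python) =====
-- def shadow_art_divide(A):
--     # Grouped one-pass sweep: per distinct endpoint value keep the net number of
--     # panel starts minus ends; a single ascending pass over distinct values
--     # replaces A's three-branch two-pointer merge.
--     net = {}
--     for l, u in A:
--         net[l] = net.get(l, 0) + 1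
--         net[u] = net.get(u, 0) - 1
--
--     first = min(l for l, u in A)
--     net[first] -= 1  # the sweep starts standing at the smallest lower endpoint
--
--     count = 1
--     last = first
--     output = []
--     for v in sorted(net):
--         d = net[v]
--         if d != 0:
--             if last != v:
--                 output.append(((last, v), count))
--             count += d
--             last = v
--     return output
-- ===== Notes on version B (the rewrite author's own statement) =====
-- stated objective: alternative
-- what changed: Replaces the three-branch two-pointer merge over two sorted endpoint lists (main while plus two drain whiles) by one dict of per-value net panel deltas and a single ascending pass over the distinct endpoint values.
-- outside the precondition, e.g. on shadow_art_divide([]): A raises IndexError, B raises ValueError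
import Mathlib
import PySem

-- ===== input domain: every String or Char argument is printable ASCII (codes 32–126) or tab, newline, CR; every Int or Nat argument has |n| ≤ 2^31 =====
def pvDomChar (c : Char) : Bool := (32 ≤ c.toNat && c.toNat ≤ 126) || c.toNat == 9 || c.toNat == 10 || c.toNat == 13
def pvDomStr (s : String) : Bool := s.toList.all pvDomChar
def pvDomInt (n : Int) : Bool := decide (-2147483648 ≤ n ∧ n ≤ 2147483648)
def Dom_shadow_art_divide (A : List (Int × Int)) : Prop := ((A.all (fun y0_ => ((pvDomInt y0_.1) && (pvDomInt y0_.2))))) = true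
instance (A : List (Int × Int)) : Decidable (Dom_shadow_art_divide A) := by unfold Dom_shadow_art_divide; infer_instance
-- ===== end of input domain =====

-- B replaces A's three-branch two-pointer merge over the two sorted endpoint lists by a
-- dict of per-value net panel deltas swept once in ascending value order (alternative
-- decomposition, same O(n log n) cost).

-- ===== PORT A =====
-- the main 'while lower_index < … and upper_index < …' loop, recursing on the two list suffixes
def saMain : List Int → List Int → Int → Int → List ((Int × Int) × Int) →
    (List Int × List Int × Int × Int × List ((Int × Int) × Int))
  | [], U, last, c, acc => ([], U, last, c, acc)
  | l :: L, [], last, c, acc => (l :: L, [], last, c, acc)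
  | l :: L, u :: U, last, c, acc =>
    if l < u then
      saMain L (u :: U) l (c + 1) (acc ++ if last ≠ l then [((last, l), c)] else [])
    else if u < l then
      saMain (l :: L) U u (c - 1) (acc ++ if last ≠ u then [((last, u), c)] else [])
    else
      saMain L U last c acc
  termination_by L U _ _ _ => L.length + U.length
  decreasing_by all_goals (simp only [List.length_cons]; omega)

-- the 'while lower_index < len(sorted_lower)' drain loop
def saDrainL : List Int → Int → Int → List ((Int × Int) × Int) → (Int × Int × List ((Int × Int) × Int))
  | [], last, c, acc => (last, c, acc)
  | l :: L, last, c, acc => saDrainL L l (c + 1) (acc ++ if last ≠ l then [((last, l), c)] else [])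

-- the 'while upper_index < len(sorted_upper)' drain loop
def saDrainU : List Int → Int → Int → List ((Int × Int) × Int) → (Int × Int × List ((Int × Int) × Int))
  | [], last, c, acc => (last, c, acc)
  | u :: U, last, c, acc => saDrainU U u (c - 1) (acc ++ if last ≠ u then [((last, u), c)] else [])

def shadow_art_divide (A : List (Int × Int)) : List ((Int × Int) × Int) :=
  let sortedLower := PySem.List.sorted (A.map (fun p => p.1)) (fun x => x)
  let sortedUpper := PySem.List.sorted (A.map (fun p => p.2)) (fun x => x)
  match sortedLower with
  | [] => []           -- sorted_lower[0] raises IndexError here; excluded by Pre_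
  | h :: t =>
    let r := saMain t sortedUpper h 1 []
    let r2 := saDrainL r.1 r.2.2.1 r.2.2.2.1 r.2.2.2.2
    (saDrainU r.2.1 r2.1 r2.2.1 r2.2.2).2.2

-- ===== PORT B =====
def shadow_art_divide_alt (A : List (Int × Int)) : List ((Int × Int) × Int) :=
  let net := A.foldl (fun d p =>
      let d1 := d.insert p.1 (d.getD p.1 0 + 1)
      d1.insert p.2 (d1.getD p.2 0 - 1)) PySem.Dict.empty
  match PySem.List.min? (A.map (fun p => p.1)) (fun x => x) with
  | none => []         -- min() of an empty generator raises ValueError here; excluded by Pre_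
  | some first =>
    let net := net.insert first (net.getD first 0 - 1)
    let vs := PySem.List.sorted net.keys (fun x => x)
    (vs.foldl (fun st v =>
        let d := net.getD v 0
        if d ≠ 0 then
          (v, st.2.1 + d, st.2.2 ++ if st.1 ≠ v then [((st.1, v), st.2.1)] else [])
        else st)
      (first, (1 : Int), ([] : List ((Int × Int) × Int)))).2.2

-- ===== PRECONDITION & SPEC =====
-- On A = [] the Python A raises IndexError (and B raises ValueError); that is the only exclusion.
def Pre_shadow_art_divide (A : List (Int × Int)) : Prop := A ≠ []
instance (A : List (Int × Int)) : Decidable (Pre_shadow_art_divide A) := by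
  unfold Pre_shadow_art_divide; infer_instance
def pvWitness_shadow_art_divide : (List (Int × Int)) := [(0, 2), (1, 3)]
def Spec_shadow_art_divide (A : List (Int × Int)) (out : List ((Int × Int) × Int)) : Prop :=
  out = shadow_art_divide_alt A
instance (A : List (Int × Int)) (out : List ((Int × Int) × Int)) : Decidable (Spec_shadow_art_divide A out) := by
  unfold Spec_shadow_art_divide; infer_instance

-- ===== CLAIM (what is proved, stated in full; the proofs are below) =====
def Claim_equal_shadow_art_divide : Prop := ∀ (A : List (Int × Int)), Dom_shadow_art_divide A →
  Pre_shadow_art_divide A → Spec_shadow_art_divide A (shadow_art_divide A)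

-- ===== LEMMAS AND PROOFS =====

-- the composed A-side loop: main merge, then the two drains
def aFull (L U : List Int) (last c : Int) (acc : List ((Int × Int) × Int)) : List ((Int × Int) × Int) :=
  let r := saMain L U last c acc
  let r2 := saDrainL r.1 r.2.2.1 r.2.2.2.1 r.2.2.2.2
  (saDrainU r.2.1 r2.1 r2.2.1 r2.2.2).2.2

-- the B-side sweep as structural recursion over the value list, with the net as a function
def bSweep (net : Int → Int) : List Int → Int → Int → List ((Int × Int) × Int) → List ((Int × Int) × Int)
  | [], _, _, acc => acc
  | v :: vs, last, c, acc =>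
    if net v ≠ 0 then
      bSweep net vs v (c + net v) (acc ++ if last ≠ v then [((last, v), c)] else [])
    else
      bSweep net vs last c acc


theorem bSweep_congr (f g : Int → Int) (vs : List Int) (h : ∀ v ∈ vs, f v = g v) :
    ∀ last c acc, bSweep f vs last c acc = bSweep g vs last c acc := by
  induction vs with
  | nil => intro last c acc; rfl
  | cons v vs ih =>
    intro last c acc
    have hv : f v = g v := h v (by simp)
    have ih' := fun last c acc => ih (fun w hw => h w (by simp [hw])) last c acc
    simp only [bSweep, hv, ih']

theorem tiePrefix (P : List Int) : ∀ X Y last c acc,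
    saMain (P ++ X) (P ++ Y) last c acc = saMain X Y last c acc := by
  induction P with
  | nil => intro X Y last c acc; rfl
  | cons p P ih =>
    intro X Y last c acc
    rw [List.cons_append, List.cons_append, saMain]
    simp only [lt_irrefl, if_false]
    exact ih X Y last c acc

theorem aFull_tiePrefix (P X Y : List Int) (last c : Int) (acc : List ((Int × Int) × Int)) :
    aFull (P ++ X) (P ++ Y) last c acc = aFull X Y last c acc := by
  unfold aFull
  rw [tiePrefix]

theorem oneStepL (w : Int) (L U : List Int) (last c : Int) (acc : List ((Int × Int) × Int))
    (hU : ∀ u ∈ U.head?, w < u) :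
    aFull (w :: L) U last c acc
      = aFull L U w (c + 1) (acc ++ if last ≠ w then [((last, w), c)] else []) := by
  cases U with
  | nil => cases L <;> simp [aFull, saMain, saDrainL]
  | cons u U' =>
    have hw : w < u := hU u rfl
    unfold aFull
    rw [saMain]
    simp only [hw, if_pos]

theorem oneStepU (w : Int) (L U : List Int) (last c : Int) (acc : List ((Int × Int) × Int))
    (hL : ∀ l ∈ L.head?, w < l) :
    aFull L (w :: U) last c acc
      = aFull L U w (c - 1) (acc ++ if last ≠ w then [((last, w), c)] else []) := by
  cases L with
  | nil => simp [aFull, saMain, saDrainL, saDrainU]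
  | cons l L' =>
    have hw : w < l := hL l rfl
    have hnot : ¬ l < w := not_lt_of_gt hw
    unfold aFull
    rw [saMain]
    simp only [hnot, hw, if_pos, if_neg, if_false]

theorem consumeL (w : Int) (n : Nat) : ∀ (L U : List Int) (last c : Int)
    (acc : List ((Int × Int) × Int)), (∀ u ∈ U.head?, w < u) →
    aFull (List.replicate (n + 1) w ++ L) U last c acc
      = aFull L U w (c + (n + 1 : Nat)) (acc ++ if last ≠ w then [((last, w), c)] else []) := by
  induction n with
  | zero =>
    intro L U last c acc hU
    simpa using oneStepL w L U last c acc hU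
  | succ m ih =>
    intro L U last c acc hU
    have : List.replicate (m + 1 + 1) w ++ L = w :: (List.replicate (m + 1) w ++ L) := by
      simp [List.replicate_succ]
    rw [this, oneStepL w _ U last c acc hU, ih L U w (c + 1) _ hU]
    simp only [ne_eq, not_true_eq_false, if_neg, not_false_eq_true, List.append_nil]
    congr 1
    push_cast
    ring

theorem consumeU (w : Int) (n : Nat) : ∀ (L U : List Int) (last c : Int)
    (acc : List ((Int × Int) × Int)), (∀ l ∈ L.head?, w < l) →
    aFull L (List.replicate (n + 1) w ++ U) last c acc
      = aFull L U w (c - (n + 1 : Nat)) (acc ++ if last ≠ w then [((last, w), c)] else []) := by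
  induction n with
  | zero =>
    intro L U last c acc hL
    simpa using oneStepU w L U last c acc hL
  | succ m ih =>
    intro L U last c acc hL
    have : List.replicate (m + 1 + 1) w ++ U = w :: (List.replicate (m + 1) w ++ U) := by
      simp [List.replicate_succ]
    rw [this, oneStepU w L _ last c acc hL, ih L U w (c - 1) _ hL]
    simp only [ne_eq, not_true_eq_false, if_neg, not_false_eq_true, List.append_nil]
    congr 1
    push_cast
    ring

theorem sorted_decomp (w : Int) : ∀ (L : List Int), L.Pairwise (· ≤ ·) →
    L = L.filter (fun x => decide (x < w)) ++ List.replicate (L.count w) w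
        ++ L.filter (fun x => decide (w < x)) := by
  intro L
  induction L with
  | nil => intro _; simp
  | cons a L ih =>
    intro hs
    rw [List.pairwise_cons] at hs
    obtain ⟨ha, hL⟩ := hs
    rcases lt_trichotomy a w with h | h | h
    · have h1 : ¬ w < a := not_lt_of_gt h
      have h2 : (a == w) = false := by simp; omega
      simp only [List.filter_cons, h, decide_true, h1, decide_false, if_true, if_false,
        List.count_cons, h2, Bool.false_eq_true, ite_false, Nat.add_zero]
      rw [List.cons_append]
      exact congrArg (a :: ·) (ih hL)
    · subst h
      have hfl : L.filter (fun x => decide (x < a)) = [] := by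
        rw [List.filter_eq_nil_iff]
        intro b hb
        simp only [decide_eq_true_eq]
        exact not_lt_of_ge (ha b hb)
      have := ih hL
      rw [hfl] at this
      simp only [List.filter_cons, lt_irrefl, decide_false, if_false, hfl,
        List.count_cons, beq_self_eq_true, if_true, List.replicate_succ]
      simpa using this
    · have h1 : ¬ a < w := not_lt_of_gt h
      have hfl : L.filter (fun x => decide (x < w)) = [] := by
        rw [List.filter_eq_nil_iff]
        intro b hb
        simp only [decide_eq_true_eq]
        exact not_lt_of_ge (le_trans (le_of_lt h) (ha b hb))
      have hcnt : L.count w = 0 := by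
        rw [List.count_eq_zero]
        intro hw
        exact absurd (ha w hw) (not_le_of_gt h)
      have hfr : L.filter (fun x => decide (w < x)) = L := by
        rw [List.filter_eq_self]
        intro b hb
        simp only [decide_eq_true_eq]
        exact lt_of_lt_of_le h (ha b hb)
      have h2 : (a == w) = false := by simp; omega
      simp [List.filter_cons, h, h1, hfl, hcnt, hfr, List.count_cons, h2]

theorem count_filter_lt (L : List Int) (w v : Int) :
    (L.filter (fun x => decide (x < w))).count v = if v < w then L.count v else 0 := by
  split_ifs with h
  · exact List.count_filter (by simpa using h)
  · rw [List.count_eq_zero]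
    intro hv
    rw [List.mem_filter] at hv
    exact h (by simpa using hv.2)

theorem count_filter_gt (L : List Int) (w v : Int) :
    (L.filter (fun x => decide (w < x))).count v = if w < v then L.count v else 0 := by
  split_ifs with h
  · exact List.count_filter (by simpa using h)
  · rw [List.count_eq_zero]
    intro hv
    rw [List.mem_filter] at hv
    exact h (by simpa using hv.2)

theorem filter_lt_eq (w : Int) (L U : List Int) (hL : L.Pairwise (· ≤ ·)) (hU : U.Pairwise (· ≤ ·))
    (h : ∀ v, v < w → L.count v = U.count v) :
    L.filter (fun x => decide (x < w)) = U.filter (fun x => decide (x < w)) := by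
  have hperm : (L.filter (fun x => decide (x < w))).Perm (U.filter (fun x => decide (x < w))) := by
    rw [List.perm_iff_count]
    intro v
    rw [count_filter_lt, count_filter_lt]
    split_ifs with hv
    · exact h v hv
    · rfl
  exact List.Perm.eq_of_pairwise' (List.Pairwise.filter _ hL) (List.Pairwise.filter _ hU) hperm

theorem aFull_self (L : List Int) (last c : Int) (acc : List ((Int × Int) × Int)) :
    aFull L L last c acc = acc := by
  have h := tiePrefix L [] [] last c acc
  simp only [List.append_nil] at h
  unfold aFull
  rw [h]
  simp [saMain, saDrainL, saDrainU]

theorem head?_gt (w : Int) (L : List Int) (h : ∀ x ∈ L, w < x) : ∀ x ∈ L.head?, w < x := by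
  intro x hx
  exact h x (List.mem_of_mem_head? hx)

theorem merge_eq : ∀ (vs : List Int), vs.Pairwise (· < ·) →
    ∀ (L U : List Int), L.Pairwise (· ≤ ·) → U.Pairwise (· ≤ ·) →
    (∀ v : Int, L.count v ≠ U.count v → v ∈ vs) →
    ∀ (last c : Int) (acc : List ((Int × Int) × Int)),
    aFull L U last c acc = bSweep (fun v => (L.count v : Int) - U.count v) vs last c acc := by
  intro vs
  induction vs with
  | nil =>
    intro _ L U hL hU hmem last c acc
    have hcnt : ∀ v, L.count v = U.count v := by
      intro v
      by_contra hne
      simpa using hmem v hne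
    have hLU : L = U :=
      List.Perm.eq_of_pairwise' hL hU (List.perm_iff_count.mpr hcnt)
    subst hLU
    rw [aFull_self]
    rfl
  | cons w vs' ih =>
    intro hvs L U hL hU hmem last c acc
    rw [List.pairwise_cons] at hvs
    obtain ⟨hw, hvs'⟩ := hvs
    have hlt : ∀ v, v < w → L.count v = U.count v := by
      intro v hv
      by_contra hne
      rcases List.mem_cons.mp (hmem v hne) with h | h
      · omega
      · exact absurd (hw v h) (by omega)
    have hPQ := filter_lt_eq w L U hL hU hlt
    have hdL := sorted_decomp w L hL
    have hdU := sorted_decomp w U hU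
    rw [hPQ] at hdL
    have hL₂ : (L.filter (fun x => decide (w < x))).Pairwise (· ≤ ·) := List.Pairwise.filter _ hL
    have hU₂ : (U.filter (fun x => decide (w < x))).Pairwise (· ≤ ·) := List.Pairwise.filter _ hU
    have hL₂gt : ∀ x ∈ L.filter (fun x => decide (w < x)), w < x := by
      intro x hx; rw [List.mem_filter] at hx; simpa using hx.2
    have hU₂gt : ∀ x ∈ U.filter (fun x => decide (w < x)), w < x := by
      intro x hx; rw [List.mem_filter] at hx; simpa using hx.2
    have hmem₂ : ∀ v, (L.filter (fun x => decide (w < x))).count v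
        ≠ (U.filter (fun x => decide (w < x))).count v → v ∈ vs' := by
      intro v hne
      rw [count_filter_gt, count_filter_gt] at hne
      by_cases hv : w < v
      · rw [if_pos hv, if_pos hv] at hne
        rcases List.mem_cons.mp (hmem v hne) with h | h
        · omega
        · exact h
      · rw [if_neg hv, if_neg hv] at hne
        exact absurd rfl hne
    have hcongr : ∀ v ∈ vs',
        ((L.filter (fun x => decide (w < x))).count v : Int)
          - (U.filter (fun x => decide (w < x))).count v
        = (L.count v : Int) - U.count v := by
      intro v hv
      rw [count_filter_gt, count_filter_gt, if_pos (hw v hv), if_pos (hw v hv)]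
    have IH := ih hvs' _ _ hL₂ hU₂ hmem₂
    obtain ⟨P, hP⟩ : ∃ P, U.filter (fun x => decide (x < w)) = P := ⟨_, rfl⟩
    obtain ⟨L₂, hL2d⟩ : ∃ X, L.filter (fun x => decide (w < x)) = X := ⟨_, rfl⟩
    obtain ⟨U₂, hU2d⟩ : ∃ X, U.filter (fun x => decide (w < x)) = X := ⟨_, rfl⟩
    obtain ⟨cl, hcl⟩ : ∃ n, L.count w = n := ⟨_, rfl⟩
    obtain ⟨cu, hcu⟩ : ∃ n, U.count w = n := ⟨_, rfl⟩
    rw [hP, hL2d, hcl] at hdL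
    rw [hP, hU2d, hcu] at hdU
    rw [hL2d] at hL₂gt
    rw [hU2d] at hU₂gt
    rw [hL2d, hU2d] at IH
    rw [hL2d, hU2d] at hcongr
    rcases Nat.lt_trichotomy cl cu with hcc | hcc | hcc
    · -- more uppers than lowers at w : the merge emits one interval and the count drops
      have hrep : List.replicate cu w
          = List.replicate cl w ++ List.replicate ((cu - cl - 1) + 1) w := by
        rw [← List.replicate_add]
        congr 1
        omega
      conv_lhs => rw [hdL, hdU, hrep]
      rw [List.append_assoc P, List.append_assoc P, aFull_tiePrefix, List.append_assoc,
        aFull_tiePrefix, consumeU w _ _ _ _ _ _ (head?_gt w _ hL₂gt)]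
      simp only [bSweep]
      have hfw : (L.count w : Int) - U.count w ≠ 0 := by rw [hcl, hcu]; omega
      rw [if_pos hfw]
      have hc : c + ((L.count w : Int) - U.count w)
          = c - ((cu - cl - 1 + 1 : Nat) : Int) := by rw [hcl, hcu]; push_cast; omega
      rw [IH, bSweep_congr _ _ _ hcongr, hc]
    · -- equal numbers at w cancel silently
      have hrep : List.replicate cu w = List.replicate cl w := by rw [hcc]
      conv_lhs => rw [hdL, hdU, hrep]
      rw [aFull_tiePrefix]
      simp only [bSweep]
      have hfw : ¬ ((L.count w : Int) - U.count w ≠ 0) := by rw [hcl, hcu]; omega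
      rw [if_neg hfw]
      rw [IH, bSweep_congr _ _ _ hcongr]
    · -- more lowers than uppers at w : the merge emits one interval and the count rises
      have hrep : List.replicate cl w
          = List.replicate cu w ++ List.replicate ((cl - cu - 1) + 1) w := by
        rw [← List.replicate_add]
        congr 1
        omega
      conv_lhs => rw [hdL, hdU, hrep]
      rw [List.append_assoc P, List.append_assoc P, aFull_tiePrefix, List.append_assoc,
        aFull_tiePrefix, consumeL w _ _ _ _ _ _ (head?_gt w _ hU₂gt)]
      simp only [bSweep]
      have hfw : (L.count w : Int) - U.count w ≠ 0 := by rw [hcl, hcu]; omega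
      rw [if_pos hfw]
      have hc : c + ((L.count w : Int) - U.count w)
          = c + ((cl - cu - 1 + 1 : Nat) : Int) := by rw [hcl, hcu]; push_cast; omega
      rw [IH, bSweep_congr _ _ _ hcongr, hc]

theorem netD (A : List (Int × Int)) : ∀ (d : PySem.Dict Int Int) (v : Int),
    (A.foldl (fun d p =>
        let d1 := d.insert p.1 (d.getD p.1 0 + 1)
        d1.insert p.2 (d1.getD p.2 0 - 1)) d).getD v 0
      = d.getD v 0 + ((A.map (fun p => p.1)).count v : Int) - ((A.map (fun p => p.2)).count v : Int) := by
  induction A with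
  | nil => intro d v; simp
  | cons p A ih =>
    intro d v
    rw [List.foldl_cons, ih]
    simp only [PySem.Dict.getD_insert, List.map_cons, List.count_cons]
    split_ifs <;> push_cast <;> simp_all <;> omega

theorem netKeysMem (A : List (Int × Int)) : ∀ (d : PySem.Dict Int Int) (v : Int),
    v ∈ (A.foldl (fun d p =>
        let d1 := d.insert p.1 (d.getD p.1 0 + 1)
        d1.insert p.2 (d1.getD p.2 0 - 1)) d).keys
      ↔ v ∈ d.keys ∨ v ∈ A.map (fun p => p.1) ∨ v ∈ A.map (fun p => p.2) := by
  induction A with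
  | nil => intro d v; simp
  | cons p A ih =>
    intro d v
    rw [List.foldl_cons, ih]
    simp only [PySem.Dict.mem_keys_insert, List.map_cons, List.mem_cons]
    tauto

theorem netKeysNodup (A : List (Int × Int)) : ∀ (d : PySem.Dict Int Int), d.keys.Nodup →
    (A.foldl (fun d p =>
        let d1 := d.insert p.1 (d.getD p.1 0 + 1)
        d1.insert p.2 (d1.getD p.2 0 - 1)) d).keys.Nodup := by
  induction A with
  | nil => intro d hd; exact hd
  | cons p A ih =>
    intro d hd
    rw [List.foldl_cons]
    exact ih _ (PySem.Dict.nodup_keys_insert _ _ _ (PySem.Dict.nodup_keys_insert _ _ _ hd))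

theorem foldl_bSweep (net : PySem.Dict Int Int) : ∀ (vs : List Int) (last c : Int)
    (acc : List ((Int × Int) × Int)),
    (vs.foldl (fun st v =>
        let d := net.getD v 0
        if d ≠ 0 then
          (v, st.2.1 + d, st.2.2 ++ if st.1 ≠ v then [((st.1, v), st.2.1)] else [])
        else st)
      (last, c, acc)).2.2 = bSweep (fun v => net.getD v 0) vs last c acc := by
  intro vs
  induction vs with
  | nil => intro last c acc; rfl
  | cons v vs ih =>
    intro last c acc
    rw [List.foldl_cons, bSweep]
    by_cases h : net.getD v 0 ≠ 0
    · rw [if_pos h, if_pos h]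
      exact ih v (c + net.getD v 0) _
    · rw [if_neg h, if_neg h]
      exact ih last c acc

theorem pairwise_lt_of_nodup (vs : List Int) (h1 : vs.Pairwise (· ≤ ·)) (h2 : vs.Nodup) :
    vs.Pairwise (· < ·) := by
  have := List.Pairwise.and h1 h2
  exact this.imp (fun hab => lt_of_le_of_ne hab.1 hab.2)

theorem shadow_art_divide_spec : Claim_equal_shadow_art_divide := by
  intro A _ hpre
  unfold Spec_shadow_art_divide
  have hlows : A.map (fun p => p.1) ≠ [] := by
    intro hx
    exact hpre (List.map_eq_nil_iff.mp hx)
  cases hsl : PySem.List.sorted (A.map (fun p => p.1)) (fun x => x) with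
  | nil => exact absurd ((PySem.List.sorted_eq_nil_iff _ _ _).mp hsl) hlows
  | cons h t =>
  cases hm : PySem.List.min? (A.map (fun p => p.1)) (fun x => x) with
  | none => exact absurd ((PySem.List.min?_eq_none_iff _ _).mp hm) hlows
  | some m =>
  have hmem_h : h ∈ A.map (fun p => p.1) := by
    rw [← PySem.List.mem_sorted _ (fun x => x) false, hsl]
    simp
  have hmh : m = h :=
    le_antisymm (PySem.List.min?_isMin hm h hmem_h)
      (PySem.List.key_head_sorted_le _ (fun x => x) hsl m (PySem.List.min?_mem hm))
  subst hmh
  -- abbreviations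
  have hpermL : (m :: t).Perm (A.map (fun p => p.1)) := by
    rw [← hsl]; exact PySem.List.sorted_perm _ _ _
  have hpermU : (PySem.List.sorted (A.map (fun p => p.2)) (fun x => x)).Perm
      (A.map (fun p => p.2)) := PySem.List.sorted_perm _ _ _
  have ht_sorted : t.Pairwise (· ≤ ·) := by
    have := PySem.List.sorted_pairwise (A.map (fun p => p.1)) (fun x => x)
    rw [hsl] at this
    exact this.of_cons
  have hsU_sorted : (PySem.List.sorted (A.map (fun p => p.2)) (fun x => x)).Pairwise (· ≤ ·) :=
    PySem.List.sorted_pairwise _ _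
  have hcntU : ∀ v : Int,
      (PySem.List.sorted (A.map (fun p => p.2)) (fun x => x)).count v
        = (A.map (fun p => p.2)).count v := fun v => hpermU.count_eq v
  have hcntL : ∀ v : Int, t.count v + (if m == v then 1 else 0)
      = (A.map (fun p => p.1)).count v := by
    intro v
    rw [← hpermL.count_eq v, List.count_cons]
  -- the dict built by B
  set net0 : PySem.Dict Int Int := A.foldl (fun d p =>
      let d1 := d.insert p.1 (d.getD p.1 0 + 1)
      d1.insert p.2 (d1.getD p.2 0 - 1)) PySem.Dict.empty with hd0
  have hnet0 : ∀ v : Int, net0.getD v 0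
        = ((A.map (fun p => p.1)).count v : Int) - ((A.map (fun p => p.2)).count v : Int) := by
    intro v
    rw [hd0, netD, PySem.Dict.getD_empty]
    omega
  have hkeys0 : ∀ v : Int, v ∈ net0.keys ↔ v ∈ A.map (fun p => p.1) ∨ v ∈ A.map (fun p => p.2) := by
    intro v
    rw [hd0, netKeysMem, PySem.Dict.keys_empty]
    simp
  have hnd0 : net0.keys.Nodup := by
    rw [hd0]
    exact netKeysNodup A _ PySem.Dict.nodup_keys_empty
  have hcont : net0.contains m = true :=
    (PySem.Dict.contains_iff_mem_keys _ _).mpr ((hkeys0 m).mpr (Or.inl hmem_h))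
  have hkeys' : (net0.insert m (net0.getD m 0 - 1)).keys = net0.keys :=
    PySem.Dict.keys_insert_of_contains _ _ hcont
  -- value of the adjusted dict = A-side net
  have hfun : ∀ v : Int, (t.count v : Int)
        - (PySem.List.sorted (A.map (fun p => p.2)) (fun x => x)).count v
      = (net0.insert m (net0.getD m 0 - 1)).getD v 0 := by
    intro v
    rw [PySem.Dict.getD_insert, hcntU]
    split_ifs with hv
    · subst hv
      have h1 := hcntL v
      rw [hnet0]
      simp only [beq_self_eq_true, if_true] at h1
      omega
    · have h1 := hcntL v
      have : (m == v) = false := by simp; omega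
      rw [this] at h1
      norm_num at h1
      rw [hnet0]
      omega
  -- the sorted distinct value list B sweeps over
  have hvs_pair : (PySem.List.sorted (net0.insert m (net0.getD m 0 - 1)).keys (fun x => x)).Pairwise
      (· < ·) := by
    apply pairwise_lt_of_nodup
    · exact PySem.List.sorted_pairwise _ _
    · rw [(PySem.List.sorted_perm _ _ _).nodup_iff, hkeys']
      exact hnd0
  have hvs_mem : ∀ v : Int,
      t.count v ≠ (PySem.List.sorted (A.map (fun p => p.2)) (fun x => x)).count v →
      v ∈ PySem.List.sorted (net0.insert m (net0.getD m 0 - 1)).keys (fun x => x) := by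
    intro v hne
    rw [PySem.List.mem_sorted, hkeys', hkeys0]
    by_contra hnot
    push_neg at hnot
    obtain ⟨hv1, hv2⟩ := hnot
    have c1 : (A.map (fun p => p.1)).count v = 0 := List.count_eq_zero.mpr hv1
    have c2 : (A.map (fun p => p.2)).count v = 0 := List.count_eq_zero.mpr hv2
    have h1 := hcntL v
    rw [c1] at h1
    rw [hcntU, c2] at hne
    have : t.count v = 0 := by omega
    exact hne (by rw [this])
  -- assemble
  have hA : shadow_art_divide A
      = aFull t (PySem.List.sorted (A.map (fun p => p.2)) (fun x => x)) m 1 [] := by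
    unfold shadow_art_divide aFull
    rw [hsl]
  have hB : shadow_art_divide_alt A
      = ((PySem.List.sorted (net0.insert m (net0.getD m 0 - 1)).keys (fun x => x)).foldl
          (fun st v =>
            let d := (net0.insert m (net0.getD m 0 - 1)).getD v 0
            if d ≠ 0 then
              (v, st.2.1 + d, st.2.2 ++ if st.1 ≠ v then [((st.1, v), st.2.1)] else [])
            else st)
          (m, (1 : Int), ([] : List ((Int × Int) × Int)))).2.2 := by
    unfold shadow_art_divide_alt
    rw [hm]
  rw [hA, hB, foldl_bSweep,
    merge_eq _ hvs_pair t _ ht_sorted hsU_sorted hvs_mem m 1 [],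
    bSweep_congr _ _ _ (fun v _ => hfun v)]
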